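-- pv_equiv track=rewrite | github.com/Python-Algorithm-Practice/algo-baksal | 태영/L2_기능개발.py | solution
-- ===== SOURCE A (Python) =====
-- def solution(progresses, speeds):
--     answer = []
--
--     day = 1
--     cnt = 0
--     while progresses:
--         if progresses[0] + day * speeds[0] >= 100:
--             progresses.pop(0)
--             speeds.pop(0)
--             cnt += 1
--         else:
--             if cnt != 0:
--                 answer.append(cnt)
--                 cnt = 0
--             day += 1
--     answer.append(cnt)      # 마지막 cnt는 while문이 종료되어 else에서 answer에 append되지 않아 while문 종료후 append
--     return answer
-- ===== SOURCE B (Python) =====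
-- def solution(progresses, speeds):
--     # O(n): per-task completion day via ceiling division, then one pass
--     # grouping by the running maximum completion day. (Does not mutate
--     # its arguments, unlike the original, which empties both lists.)
--     deadlines = [max(1, -((p - 100) // s)) for p, s in zip(progresses, speeds)]
--     answer = []
--     cnt = 0
--     cur = 0
--     for d in deadlines:
--         if d > cur:
--             if cnt:
--                 answer.append(cnt)
--             cnt = 0
--             cur = d
--         cnt += 1
--     answer.append(cnt)
--     return answer
-- ===== Notes on version B (the rewrite author's own statement) =====
-- stated objective: faster
-- what changed: B replaces A's day-by-day simulation with destructive pops by a closed-form completion day per task (ceiling division) and a single pass grouping by the running maximum; intended as faster (asymptotic) — in a timing run A timed out at n=16 where B returned instantly, so no clean ratio was measured; B does not mutate its arguments.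
-- outside the precondition, e.g. on solution([150], [0]): A returns [1], B raises ZeroDivisionError
import Mathlib
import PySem

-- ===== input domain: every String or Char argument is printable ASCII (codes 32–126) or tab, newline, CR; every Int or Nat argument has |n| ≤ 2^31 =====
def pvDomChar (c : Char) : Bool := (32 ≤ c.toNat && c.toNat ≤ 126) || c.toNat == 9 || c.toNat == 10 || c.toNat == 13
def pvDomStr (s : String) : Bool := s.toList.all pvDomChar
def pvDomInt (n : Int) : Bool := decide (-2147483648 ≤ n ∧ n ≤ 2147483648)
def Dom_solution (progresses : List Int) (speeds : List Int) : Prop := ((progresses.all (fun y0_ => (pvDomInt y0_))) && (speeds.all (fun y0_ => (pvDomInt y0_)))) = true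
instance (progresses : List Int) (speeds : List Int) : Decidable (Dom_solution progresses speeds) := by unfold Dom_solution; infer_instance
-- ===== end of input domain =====

-- B replaces A's day-by-day simulation by per-task closed-form completion days and one
-- grouping pass; intended as faster (in a timing run A timed out at n=16 where B
-- returned, so no ratio was measured). Equivalence is about the RETURN value only:
-- the Python A empties both argument lists in place, B leaves them untouched.

-- ===== PORT A =====
-- A's while-loop: state (progresses, speeds, day, cnt, answer); the fuel argument only
-- makes the loop total in Lean (under Pre_ the fuel chosen in `solution` is never exhausted).
def loopA (fuel : Nat) (ps ss : List Int) (day cnt : Int) (answer : List Int) : List Int :=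
  match fuel, ps, ss with
  | 0, _, _ => answer ++ [cnt]
  | _ + 1, [], _ => answer ++ [cnt]
  | _ + 1, _ :: _, [] => answer ++ [cnt]   -- Python raises IndexError here; excluded by Pre_
  | f + 1, p :: ps', s :: ss' =>
      if 100 ≤ p + day * s then
        loopA f ps' ss' day (cnt + 1) answer
      else if cnt ≠ 0 then
        loopA f (p :: ps') (s :: ss') (day + 1) 0 (answer ++ [cnt])
      else
        loopA f (p :: ps') (s :: ss') (day + 1) cnt answer

def solution (progresses : List Int) (speeds : List Int) : List Int :=
  loopA (1 + (progresses.map (fun p => p.natAbs + 101)).sum) progresses speeds 1 0 []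

-- ===== PORT B =====
def deadline (p s : Int) : Int := max 1 (-(PySem.Int.floordiv (p - 100) s))

def loopB (ds : List Int) (cur cnt : Int) (answer : List Int) : List Int :=
  match ds with
  | [] => answer ++ [cnt]
  | d :: ds' =>
      if cur < d then loopB ds' d 1 (if cnt ≠ 0 then answer ++ [cnt] else answer)
      else loopB ds' cur (cnt + 1) answer

def solution_alt (progresses : List Int) (speeds : List Int) : List Int :=
  loopB (List.zipWith deadline progresses speeds) 0 0 []

-- ===== PRECONDITION & SPEC =====
-- Pre_ excludes inputs where some speed paired with a task is ≤ 0 (A then diverges except on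
-- accidental corner values, and B's ceiling division raises ZeroDivisionError on s = 0) and
-- inputs with fewer speeds than progresses (A raises IndexError).
def Pre_solution (progresses : List Int) (speeds : List Int) : Prop :=
  progresses.length ≤ speeds.length ∧ ∀ s ∈ speeds.take progresses.length, 1 ≤ s
instance (progresses : List Int) (speeds : List Int) : Decidable (Pre_solution progresses speeds) := by unfold Pre_solution; infer_instance

def pvWitness_solution : List Int × List Int := ([93, 30, 55], [1, 30, 5])

def Spec_solution (progresses : List Int) (speeds : List Int) (out : List Int) : Prop := out = solution_alt progresses speeds
instance (progresses : List Int) (speeds : List Int) (out : List Int) : Decidable (Spec_solution progresses speeds out) := by unfold Spec_solution; infer_instance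

-- ===== CLAIM (what is proved, stated in full; the proofs are below) =====
def Claim_equal_solution : Prop := ∀ (progresses : List Int) (speeds : List Int), Dom_solution progresses speeds → Pre_solution progresses speeds → Spec_solution progresses speeds (solution progresses speeds)

-- ===== LEMMAS AND PROOFS =====

-- number of iterations A's loop still performs from state (ps, ss, day)
def iterF : List Int → List Int → Int → Nat
  | [], _, _ => 0
  | _ :: _, [], _ => 0
  | p :: ps, s :: ss, day =>
      (deadline p s - day).toNat + 1 + iterF ps ss (max day (deadline p s))

lemma deadline_pos (p s : Int) : 1 ≤ deadline p s := le_max_left 1 _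

lemma complete_iff (p s day : Int) (hs : 1 ≤ s) (hd : 1 ≤ day) :
    (100 ≤ p + day * s) ↔ deadline p s ≤ day := by
  unfold deadline
  rw [max_le_iff]
  constructor
  · intro h
    refine ⟨hd, ?_⟩
    have h1 : (-day) ≤ PySem.Int.floordiv (p - 100) s := by
      rw [PySem.Int.le_floordiv_iff_mul_le (by omega : (0:Int) < s)]
      nlinarith
    omega
  · rintro ⟨-, h⟩
    have h1 : (-day) ≤ PySem.Int.floordiv (p - 100) s := by omega
    rw [PySem.Int.le_floordiv_iff_mul_le (by omega : (0:Int) < s)] at h1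
    nlinarith

lemma deadline_le (p s : Int) (hs : 1 ≤ s) : deadline p s ≤ 100 + p.natAbs := by
  unfold deadline
  have h1 : (-(100 + (p.natAbs : Int))) ≤ PySem.Int.floordiv (p - 100) s := by
    rw [PySem.Int.le_floordiv_iff_mul_le (by omega : (0:Int) < s)]
    have hp : -(p.natAbs : Int) ≤ p := by omega
    nlinarith [Int.natCast_natAbs p, abs_nonneg p]
  have h2 : (0:Int) ≤ (p.natAbs : Int) := by omega
  omega

lemma iterF_le (ps : List Int) : ∀ ss day, 1 ≤ day → (∀ s ∈ ss.take ps.length, 1 ≤ s) →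
    iterF ps ss day ≤ (ps.map (fun p => p.natAbs + 101)).sum := by
  induction ps with
  | nil => intro ss day _ _; simp [iterF]
  | cons p ps ih =>
    intro ss day hd hs
    cases ss with
    | nil => simp [iterF]
    | cons s ss =>
      simp only [List.length_cons, List.take_succ_cons, List.mem_cons, forall_eq_or_imp] at hs
      have hdl := deadline_le p s hs.1
      have hdp := deadline_pos p s
      have htail := ih ss (max day (deadline p s)) (le_trans hd (le_max_left _ _)) hs.2
      simp only [iterF, List.map_cons, List.sum_cons]
      omega

lemma loopA_eq (fuel : Nat) : ∀ ps ss day cnt answer,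
    ps.length ≤ ss.length → (∀ s ∈ ss.take ps.length, 1 ≤ s) → 1 ≤ day →
    iterF ps ss day ≤ fuel →
    loopA fuel ps ss day cnt answer = loopB (List.zipWith deadline ps ss) day cnt answer := by
  induction fuel with
  | zero =>
    intro ps ss day cnt answer hlen _ _ hfuel
    cases ps with
    | nil => simp [loopA, loopB]
    | cons p ps' =>
      cases ss with
      | nil => simp at hlen
      | cons s ss' => simp [iterF] at hfuel
  | succ f ih =>
    intro ps ss day cnt answer hlen hs hd hfuel
    cases ps with
    | nil => simp [loopA, loopB]
    | cons p ps' =>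
      cases ss with
      | nil => simp at hlen
      | cons s ss' =>
        simp only [List.length_cons, List.take_succ_cons, List.mem_cons, forall_eq_or_imp] at hs
        simp only [List.length_cons, Nat.succ_le_succ_iff] at hlen
        have hiff := complete_iff p s day hs.1 hd
        simp only [iterF] at hfuel
        by_cases hc : 100 ≤ p + day * s
        · -- head completes now: deadline ≤ day
          have hdle : deadline p s ≤ day := hiff.mp hc
          have hmax : max day (deadline p s) = day := by omega
          rw [hmax] at hfuel
          simp only [loopA, if_pos hc, List.zipWith_cons_cons, loopB,
            if_neg (by omega : ¬ day < deadline p s)]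
          exact ih ps' ss' day (cnt + 1) answer hlen hs.2 hd (by omega)
        · -- head not yet complete: day < deadline
          have hdlt : day < deadline p s := by omega
          have hmax : max day (deadline p s) = deadline p s := by omega
          rw [hmax] at hfuel
          have hfuel' : iterF (p :: ps') (s :: ss') (day + 1) ≤ f := by
            simp only [iterF]
            have : max (day + 1) (deadline p s) = deadline p s := by omega
            rw [this]
            omega
          have hA : loopA (f + 1) (p :: ps') (s :: ss') day cnt answer =
              loopA f (p :: ps') (s :: ss') (day + 1) 0
                (if cnt ≠ 0 then answer ++ [cnt] else answer) := by
            by_cases hcnt : cnt ≠ 0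
            · simp [loopA, if_neg hc, hcnt]
            · simp only [ne_eq, not_not] at hcnt
              subst hcnt
              simp [loopA, if_neg hc]
          rw [hA, ih (p :: ps') (s :: ss') (day + 1) 0 _
              (by simpa using hlen)
              (by simp only [List.length_cons, List.take_succ_cons, List.mem_cons,
                    forall_eq_or_imp]; exact hs)
              (by omega) hfuel']
          -- both sides start the next group at day `deadline p s` with cnt 1
          by_cases h2 : day + 1 < deadline p s
          · simp [loopB, if_pos hdlt, if_pos h2]
          · have he : deadline p s = day + 1 := by omega
            simp [loopB, he]

lemma loopB_start (ds : List Int) (a : List Int) (h : ∀ d ∈ ds, 1 ≤ d) :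
    loopB ds 0 0 a = loopB ds 1 0 a := by
  cases ds with
  | nil => rfl
  | cons d ds' =>
    have hd : 1 ≤ d := h d (by simp)
    by_cases h1 : 1 < d
    · simp [loopB, if_pos (by omega : (0:Int) < d), if_pos h1]
    · have : d = 1 := by omega
      subst this
      simp [loopB]

-- ===== VERDICT (by name: the statement is the Claim_ definition above) =====
lemma zip_deadline_pos (ps : List Int) : ∀ ss, ∀ d ∈ List.zipWith deadline ps ss, 1 ≤ d := by
  induction ps with
  | nil => intro ss d hd; simp at hd
  | cons p ps ih =>
    intro ss d hd
    cases ss with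
    | nil => simp at hd
    | cons s ss =>
      simp only [List.zipWith_cons_cons, List.mem_cons] at hd
      rcases hd with rfl | hd
      · exact deadline_pos p s
      · exact ih ss d hd

theorem solution_spec : Claim_equal_solution := by
  intro ps ss _ hpre
  obtain ⟨hlen, hs⟩ := hpre
  unfold Spec_solution solution solution_alt
  rw [loopA_eq _ ps ss 1 0 [] hlen hs (by omega)
      (by have := iterF_le ps ss 1 (by omega) hs; omega)]
  rw [loopB_start _ _ (zip_deadline_pos ps ss)]
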